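-- pv_equiv track=rewrite | github.com/Jsantos20201/Python_Practices | Python/practice 7.py | lastUnique
-- ===== SOURCE A (Python) =====
-- def lastUnique(s):
--     char_dic = {}
--
--     for char in s:
--         if char in char_dic:
--             char_dic[char] += 1
--         else:
--             char_dic[char] = 1
--
--     for char in reversed(s):
--         if char_dic[char] == 1:
--             return char
--     return None
-- ===== SOURCE B (Python) =====
-- def lastUnique(s):
--     once = []          # chars seen exactly once so far, in order of occurrence
--     repeated = set()   # chars seen at least twice
--     for ch in s:
--         if ch in repeated:
--             continue
--         if ch in once:
--             once.remove(ch)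
--             repeated.add(ch)
--         else:
--             once.append(ch)
--     return once[-1] if once else None
-- ===== Notes on version B (the rewrite author's own statement) =====
-- stated objective: alternative
-- what changed: Replaces A's count-table build plus reverse rescan with a single forward pass maintaining an ordered list of characters seen exactly once and a set of repeated ones; the answer is the last element of that list, with no reverse iteration and no counting.
import Mathlib
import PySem

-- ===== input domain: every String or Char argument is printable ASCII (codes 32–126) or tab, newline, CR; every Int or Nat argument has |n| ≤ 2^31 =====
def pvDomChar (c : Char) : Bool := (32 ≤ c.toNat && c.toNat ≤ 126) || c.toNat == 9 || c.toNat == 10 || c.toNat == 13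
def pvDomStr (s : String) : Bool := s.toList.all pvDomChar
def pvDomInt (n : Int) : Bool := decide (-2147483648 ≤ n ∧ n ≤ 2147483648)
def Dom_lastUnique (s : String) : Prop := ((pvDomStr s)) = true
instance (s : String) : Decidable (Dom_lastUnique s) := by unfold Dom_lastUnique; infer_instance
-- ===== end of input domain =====

-- B replaces A's count-table build plus reverse rescan with ONE forward pass that keeps an
-- ordered list of characters seen exactly once and a set of repeated ones; the answer is the
-- last element of that list. No reverse iteration, no counting — an alternative algorithm.

-- ===== PORT A =====
-- first loop of A: build char_dic
def lastUniqueDic (s : List Char) : PySem.Dict Char Int :=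
  s.foldl (fun d c => if d.contains c then d.modify c 0 (· + 1) else d.insert c 1) PySem.Dict.empty

-- second loop of A: scan reversed(s), return the first char whose count is 1
def lastUniqueScan (d : PySem.Dict Char Int) : List Char → Option String
  | [] => none
  | c :: rest => if d.getD c 0 = 1 then some (String.ofList [c]) else lastUniqueScan d rest

def lastUnique (s : String) : Option String :=
  lastUniqueScan (lastUniqueDic s.toList) s.toList.reverse

-- ===== PORT B =====
-- one iteration of B's forward loop over the state (once, repeated);
-- Python's once.remove(ch) (remove first occurrence, here guarded by membership) is List.erase
def lastUniqueStep (st : List Char × PySem.Set Char) (ch : Char) : List Char × PySem.Set Char :=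
  if PySem.Set.contains st.2 ch then st
  else if ch ∈ st.1 then (st.1.erase ch, PySem.Set.add st.2 ch)
  else (st.1 ++ [ch], st.2)

-- once[-1] if once else None
def lastUnique_alt (s : String) : Option String :=
  match (s.toList.foldl lastUniqueStep ([], PySem.Set.empty)).1.getLast? with
  | some c => some (String.ofList [c])
  | none => none

-- ===== PRECONDITION & SPEC =====
def Spec_lastUnique (s : String) (out : Option String) : Prop := out = lastUnique_alt s
instance (s : String) (out : Option String) : Decidable (Spec_lastUnique s out) := by unfold Spec_lastUnique; infer_instance

-- ===== CLAIM (what is proved, stated in full; the proofs are below) =====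
def Claim_equal_lastUnique : Prop := ∀ (s : String), Dom_lastUnique s → Spec_lastUnique s (lastUnique s)

-- ===== LEMMAS AND PROOFS =====

-- A's if-contains-then-modify-else-insert step IS Counter's modify step
theorem dic_step (d : PySem.Dict Char Int) (c : Char) :
    (if d.contains c then d.modify c 0 (· + 1) else d.insert c 1) = d.modify c 0 (· + 1) := by
  simp only [PySem.Dict.modify]
  split_ifs with h <;> simp [PySem.Dict.getD_of_not_contains, h]

theorem dic_fold_eq (s : List Char) : ∀ (d : PySem.Dict Char Int),
    s.foldl (fun d c => if d.contains c then d.modify c 0 (· + 1) else d.insert c 1) d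
      = s.foldl (fun d c => d.modify c 0 (· + 1)) d := by
  induction s with
  | nil => intro _; rfl
  | cons x t ih => intro d; rw [List.foldl_cons, List.foldl_cons, dic_step]; exact ih _

theorem lastUniqueDic_getD (s : List Char) (c : Char) :
    (lastUniqueDic s).getD c 0 = s.count c := by
  unfold lastUniqueDic
  rw [dic_fold_eq]
  simpa using PySem.Dict.getD_foldl_modify_add_one s (PySem.Dict.empty : PySem.Dict Char Int) c

-- A's reverse scan is find? with the count-is-1 predicate
theorem scan_eq_find? (s : List Char) (l : List Char) :
    lastUniqueScan (lastUniqueDic s) l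
      = (l.find? (fun c => s.count c = 1)).map (fun c => String.ofList [c]) := by
  induction l with
  | nil => rfl
  | cons c rest ih =>
    by_cases h : s.count c = 1
    · have h' : (s.count c : Int) = 1 := by exact_mod_cast h
      simp [lastUniqueScan, lastUniqueDic_getD, h]
    · have h' : ¬ ((s.count c : Int) = 1) := by exact_mod_cast h
      simp [lastUniqueScan, lastUniqueDic_getD, h', h, ih]

theorem find?_eq_head?_filter' {α : Type} (p : α → Bool) : ∀ (l : List α),
    l.find? p = (l.filter p).head?
  | [] => rfl
  | x :: t => by
    by_cases h : p x = true
    · rw [List.find?_cons_of_pos h, List.filter_cons_of_pos h]; rfl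
    · have h' : p x = false := by simpa using h
      rw [List.find?_cons_of_neg (by simp [h']), List.filter_cons_of_neg (by simp [h']),
        find?_eq_head?_filter' p t]

-- the first count-1 char of the reverse is the last element of the count-1 filter
theorem find?_reverse_eq_getLast? {α : Type} [DecidableEq α] (p : α → Bool) (l : List α) :
    l.reverse.find? p = (l.filter p).getLast? := by
  rw [find?_eq_head?_filter', List.filter_reverse, List.head?_reverse]

-- B's loop invariant: after folding over l, `once` is the in-order list of count-1 chars of l,
-- and `repeated` holds exactly the chars with count ≥ 2.
theorem foldl_inv (l : List Char) :
    (l.foldl lastUniqueStep ([], PySem.Set.empty)).1 = l.filter (fun c => l.count c = 1) ∧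
    ∀ c : Char, c ∈ (l.foldl lastUniqueStep ([], PySem.Set.empty)).2 ↔ 2 ≤ l.count c := by
  induction l using List.reverseRecOn with
  | nil => exact ⟨rfl, by simp [PySem.Set.empty]⟩
  | append_singleton p x ih =>
    obtain ⟨ho, hr⟩ := ih
    rw [List.foldl_append, List.foldl_cons, List.foldl_nil]
    set st := p.foldl lastUniqueStep ([], PySem.Set.empty) with hst
    have hcnt : ∀ c : Char, (p ++ [x]).count c = p.count c + (if c = x then 1 else 0) := by
      intro c
      by_cases h : c = x
      · subst h; simp [List.count_append]
      · simp [List.count_append, h, Ne.symm h]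
    have hxo : x ∈ st.1 ↔ p.count x = 1 := by
      rw [ho]; simp only [List.mem_filter, decide_eq_true_eq]
      constructor
      · exact fun h => h.2
      · intro h; exact ⟨List.count_pos_iff.mp (by omega), h⟩
    by_cases hrep : 2 ≤ p.count x
    · -- already repeated: state unchanged
      have hc : PySem.Set.contains st.2 x = true := (PySem.Set.contains_iff st.2 x).mpr ((hr x).mpr hrep)
      simp only [lastUniqueStep, hc, if_true]
      refine ⟨?_, ?_⟩
      · rw [ho, List.filter_append]
        have h1 : p.filter (fun c => decide (p.count c = 1))
            = p.filter (fun c => decide ((p ++ [x]).count c = 1)) := by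
          apply List.filter_congr
          intro c hc'
          rw [hcnt]
          by_cases h : c = x
          · subst h; rw [if_pos rfl]; exact decide_eq_decide.mpr (by omega)
          · rw [if_neg h]; simp
        have h2 : [x].filter (fun c => decide ((p ++ [x]).count c = 1)) = [] := by
          have hx1 : ¬ ((p ++ [x]).count x = 1) := by rw [hcnt, if_pos rfl]; omega
          rw [List.filter_cons_of_neg (by simpa using hx1), List.filter_nil]
        rw [h1, h2, List.append_nil]
      · intro c; rw [hr c, hcnt]
        by_cases h : c = x
        · subst h; rw [if_pos rfl]; omega
        · rw [if_neg h]; omega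
    · by_cases h1 : p.count x = 1
      · -- seen once before: move x from once to repeated
        have hc : PySem.Set.contains st.2 x = false := by
          rw [← Bool.not_eq_true, PySem.Set.contains_iff, hr]; omega
        have hmem : x ∈ st.1 := hxo.mpr h1
        simp only [lastUniqueStep, hc, Bool.false_eq_true, if_false, hmem, if_true]
        refine ⟨?_, ?_⟩
        · have hnd : st.1.Nodup := by
            rw [ho, List.nodup_iff_count_le_one]
            intro c
            by_cases hpc : List.count c p = 1
            · rw [List.count_filter (by simp [hpc])]; omega
            · have hno : c ∉ List.filter (fun c => decide (List.count c p = 1)) p := by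
                simp [List.mem_filter, hpc]
              rw [List.count_eq_zero.mpr hno]; omega
          rw [hnd.erase_eq_filter, ho, List.filter_filter, List.filter_append]
          have hA : p.filter (fun a => a != x && decide (p.count a = 1))
              = p.filter (fun c => decide ((p ++ [x]).count c = 1)) := by
            apply List.filter_congr
            intro c _
            rw [hcnt]
            by_cases h : c = x
            · subst h; rw [if_pos rfl]; simp [h1]
            · rw [if_neg h]; simp [h]
          have hB : [x].filter (fun c => decide ((p ++ [x]).count c = 1)) = [] := by
            have hx1 : ¬ ((p ++ [x]).count x = 1) := by rw [hcnt, if_pos rfl]; omega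
            rw [List.filter_cons_of_neg (by simpa using hx1), List.filter_nil]
          rw [hA, hB, List.append_nil]
        · intro c
          rw [PySem.Set.mem_add, hr, hcnt]
          by_cases h : c = x
          · subst h
            rw [if_pos rfl]
            constructor
            · intro _; omega
            · intro _; exact Or.inr rfl
          · rw [if_neg h]; simp [h]
      · -- never seen: append to once
        have h0 : p.count x = 0 := by omega
        have hc : PySem.Set.contains st.2 x = false := by
          rw [← Bool.not_eq_true, PySem.Set.contains_iff, hr]; omega
        have hmem : x ∉ st.1 := fun h => by rw [hxo] at h; omega
        simp only [lastUniqueStep, hc, Bool.false_eq_true, if_false, hmem]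
        refine ⟨?_, ?_⟩
        · rw [ho, List.filter_append]
          have hA : p.filter (fun c => decide (p.count c = 1))
              = p.filter (fun c => decide ((p ++ [x]).count c = 1)) := by
            apply List.filter_congr
            intro c hcp
            rw [hcnt]
            have hne : c ≠ x := fun h => by
              subst h; exact absurd (List.count_pos_iff.mpr hcp) (by omega)
            rw [if_neg hne]; simp
          have hB : [x].filter (fun c => decide ((p ++ [x]).count c = 1)) = [x] := by
            have hx1 : (p ++ [x]).count x = 1 := by rw [hcnt, if_pos rfl, h0]
            rw [List.filter_cons_of_pos (by simpa using hx1), List.filter_nil]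
          rw [hA, hB]
        · intro c; rw [hr c, hcnt]
          by_cases h : c = x
          · subst h; rw [if_pos rfl, h0]; omega
          · rw [if_neg h]; omega

-- ===== VERDICT (by name: the statement is the Claim_ definition above) =====
theorem lastUnique_spec : Claim_equal_lastUnique := by
  intro s _
  unfold Spec_lastUnique lastUnique lastUnique_alt
  rw [scan_eq_find?, find?_reverse_eq_getLast?, (foldl_inv s.toList).1]
  cases (s.toList.filter (fun c => s.toList.count c = 1)).getLast? <;> rfl
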